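-- pv_equiv track=rewrite | github.com/wh-jung0522/AlgorithmStudy | Programmers/Test/3.Heap/1_Spicy.py | solution
-- ===== SOURCE A (Python) =====
-- import heapq
--
-- def solution(scoville, K):
--     scoville_heap = heap_sort(scoville)
--     answer = 0
--     while(True):
--         a = heapq.heappop(scoville_heap)
--         if(a>=K):
--             break
--         if (len(scoville_heap)==0):
--             answer = -1
--             break
--         b = heapq.heappop(scoville_heap)
--         c = a+(b*2)
--         heapq.heappush(scoville_heap,c)
--         answer += 1
--
--     return answer
--
-- def heap_sort(Inlist):
--     temp_heap = []
--     for component in Inlist: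
--         heapq.heappush(temp_heap,component)
--
--     return temp_heap
-- ===== SOURCE B (Python) =====
-- def solution(scoville, K):
--     # Sort once, then merge two monotone queues: the sorted originals (pointer i)
--     # and a FIFO of combined values (pointer j), which are produced in
--     # nondecreasing order, so the minimum is always one of the two fronts.
--     base = sorted(scoville)
--     mixed = []
--     i = j = 0
--     answer = 0
--     while True:
--         if i < len(base) and (j >= len(mixed) or base[i] <= mixed[j]):
--             a = base[i]
--             i += 1
--         else:
--             a = mixed[j]  # IndexError when everything is exhausted, like A's heappop
--             j += 1
--         if a >= K:
--             break
--         if i == len(base) and j == len(mixed):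
--             answer = -1
--             break
--         if i < len(base) and (j >= len(mixed) or base[i] <= mixed[j]):
--             b = base[i]
--             i += 1
--         else:
--             b = mixed[j]
--             j += 1
--         mixed.append(a + b * 2)
--         answer += 1
--     return answer
-- ===== Notes on version B (the rewrite author's own statement) =====
-- stated objective: faster
-- what changed: Replaces the heap entirely with a sort-once two-queue monotone merge: the sorted originals are consumed by a pointer and combined values go into a plain FIFO (they are provably produced in nondecreasing order), so each round is O(1) pointer work with no heap sift or re-insertion.
import Mathlib
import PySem

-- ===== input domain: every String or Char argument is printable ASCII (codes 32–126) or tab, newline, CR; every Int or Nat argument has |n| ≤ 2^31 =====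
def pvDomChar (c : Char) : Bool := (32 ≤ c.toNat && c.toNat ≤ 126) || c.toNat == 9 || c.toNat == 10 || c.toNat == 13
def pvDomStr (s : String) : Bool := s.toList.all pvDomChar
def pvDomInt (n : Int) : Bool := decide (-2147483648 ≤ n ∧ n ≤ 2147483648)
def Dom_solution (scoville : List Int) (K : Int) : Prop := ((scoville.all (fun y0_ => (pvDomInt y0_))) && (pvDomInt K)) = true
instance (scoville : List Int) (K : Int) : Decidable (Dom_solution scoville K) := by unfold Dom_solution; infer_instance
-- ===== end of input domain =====

-- B replaces A's heap with a sort-once two-queue monotone merge (sorted originals + FIFO of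
-- combined values); both Pythons raise IndexError on the empty list (excluded by Pre_).

-- ===== PORT A =====
-- heapq is modelled at the value level: the heap is the list of its elements, heappush adds the
-- element, heappop returns a minimal element and removes it.  The contents are ints, so which
-- minimal element is removed cannot affect any value the program computes; this is exact for
-- every value solution returns.
def pyHeappush (h : List Int) (x : Int) : List Int := h ++ [x]

def pyHeappop? (h : List Int) : Option (Int × List Int) :=
  match h.min? with
  | none => none
  | some m => some (m, h.erase m)

-- heap_sort in A: push every component onto an empty heap
def heapSortA (inlist : List Int) : List Int := inlist.foldl pyHeappush []

theorem pyHeappop?_length {h : List Int} {a : Int} {t : List Int}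
    (hp : pyHeappop? h = some (a, t)) : t.length + 1 = h.length := by
  unfold pyHeappop? at hp
  cases hm : h.min? with
  | none => simp [hm] at hp
  | some m =>
    simp only [hm] at hp
    obtain ⟨hma, het⟩ : m = a ∧ h.erase m = t := by simpa using hp
    subst het
    have hmem : m ∈ h := List.min?_mem hm
    have := List.length_erase_of_mem hmem
    have hpos : 0 < h.length := List.length_pos_of_mem hmem
    omega

-- the while-loop of A (returns 0 where Python would raise popping an empty heap; Pre_ excludes that)
def loopA (K : Int) (h : List Int) (ans : Int) : Int :=
  match hp : pyHeappop? h with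
  | none => 0
  | some (a, h1) =>
    if a ≥ K then ans
    else if h1.length = 0 then -1
    else
      match hp2 : pyHeappop? h1 with
      | none => 0
      | some (b, h2) => loopA K (pyHeappush h2 (a + b * 2)) (ans + 1)
termination_by h.length
decreasing_by
  have l1 := pyHeappop?_length hp
  have l2 := pyHeappop?_length hp2
  simp [pyHeappush]
  omega

def solution (scoville : List Int) (K : Int) : Int :=
  loopA K (heapSortA scoville) 0

-- ===== PORT B =====
-- B keeps the sorted originals and the FIFO of combined values as arrays read through pointers
-- i and j; here each queue is the list of its not-yet-consumed elements.  popB is B's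
-- "take the smaller front" step (none = IndexError on a fully exhausted state, as in Python).
def popB (base mixed : List Int) : Option (Int × List Int × List Int) :=
  match base, mixed with
  | bh :: bt, [] => some (bh, bt, [])
  | bh :: bt, mh :: mt => if bh ≤ mh then some (bh, bt, mh :: mt) else some (mh, bh :: bt, mt)
  | [], mh :: mt => some (mh, [], mt)
  | [], [] => none

-- popB's structural effect: the popped element is the head of one queue, the other is untouched
theorem popB_cases {base mixed : List Int} {a : Int} {b1 m1 : List Int}
    (hp : popB base mixed = some (a, b1, m1)) :
    (base = a :: b1 ∧ m1 = mixed) ∨ (b1 = base ∧ mixed = a :: m1) := by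
  cases base with
  | nil =>
    cases mixed with
    | nil => simp [popB] at hp
    | cons mh mt =>
      simp only [popB, Option.some.injEq, Prod.mk.injEq] at hp
      obtain ⟨rfl, rfl, rfl⟩ := hp
      right; exact ⟨rfl, rfl⟩
  | cons bh bt =>
    cases mixed with
    | nil =>
      simp only [popB, Option.some.injEq, Prod.mk.injEq] at hp
      obtain ⟨rfl, rfl, rfl⟩ := hp
      left; exact ⟨rfl, rfl⟩
    | cons mh mt =>
      by_cases hle : bh ≤ mh
      · simp only [popB, hle, if_true, Option.some.injEq, Prod.mk.injEq] at hp
        obtain ⟨rfl, rfl, rfl⟩ := hp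
        left; exact ⟨rfl, rfl⟩
      · simp only [popB, hle, if_false, Option.some.injEq, Prod.mk.injEq] at hp
        obtain ⟨rfl, rfl, rfl⟩ := hp
        right; exact ⟨rfl, rfl⟩

theorem popB_length {base mixed : List Int} {a : Int} {b1 m1 : List Int}
    (hp : popB base mixed = some (a, b1, m1)) :
    b1.length + m1.length + 1 = base.length + mixed.length := by
  rcases popB_cases hp with ⟨rfl, rfl⟩ | ⟨rfl, rfl⟩ <;> simp <;> omega

-- the while-loop of B (returns 0 where Python would raise reading past both queues)
def loopB (K : Int) (base mixed : List Int) (ans : Int) : Int :=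
  match hp : popB base mixed with
  | none => 0
  | some (a, base1, mixed1) =>
    if a ≥ K then ans
    else if base1.length = 0 ∧ mixed1.length = 0 then -1
    else
      match hp2 : popB base1 mixed1 with
      | none => 0
      | some (b, base2, mixed2) => loopB K base2 (mixed2 ++ [a + b * 2]) (ans + 1)
termination_by base.length + mixed.length
decreasing_by
  have l1 := popB_length hp
  have l2 := popB_length hp2
  simp
  omega

def solution_alt (scoville : List Int) (K : Int) : Int :=
  loopB K (PySem.List.sorted scoville (fun x => x) false) [] 0

-- ===== PRECONDITION & SPEC =====
-- Pre_ excludes only the empty list, on which both Pythons raise IndexError (pop past the end).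
def Pre_solution (scoville : List Int) (K : Int) : Prop := scoville ≠ []
instance (scoville : List Int) (K : Int) : Decidable (Pre_solution scoville K) := by unfold Pre_solution; infer_instance
def pvWitness_solution : List Int × Int := ([1, 2, 3, 9, 10, 12], 7)

def Spec_solution (scoville : List Int) (K : Int) (out : Int) : Prop := out = solution_alt scoville K
instance (scoville : List Int) (K : Int) (out : Int) : Decidable (Spec_solution scoville K out) := by unfold Spec_solution; infer_instance

-- ===== CLAIM (what is proved, stated in full; the proofs are below) =====
def Claim_equal_solution : Prop := ∀ (scoville : List Int) (K : Int), Dom_solution scoville K → Pre_solution scoville K → Spec_solution scoville K (solution scoville K)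

-- ===== LEMMAS AND PROOFS =====

-- the loop invariant of B: both queues are sorted; every combined value m is ≤ 3x for every
-- original x still in base; and any two distinct combined values bound each other by a factor 3
def InvB (base mixed : List Int) : Prop :=
  base.Pairwise (· ≤ ·) ∧ mixed.Pairwise (· ≤ ·) ∧
  (∀ m ∈ mixed, ∀ x ∈ base, m ≤ 3 * x) ∧
  mixed.Pairwise (fun m m' => m ≤ 3 * m' ∧ m' ≤ 3 * m)

-- with both queues sorted, popB pops a minimum of all remaining elements
theorem popB_min {base mixed : List Int} {a : Int} {b1 m1 : List Int}
    (hb : base.Pairwise (· ≤ ·)) (hm : mixed.Pairwise (· ≤ ·))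
    (hp : popB base mixed = some (a, b1, m1)) :
    ∀ x ∈ base ++ mixed, a ≤ x := by
  intro x hx
  cases base with
  | nil =>
    cases mixed with
    | nil => simp [popB] at hp
    | cons mh mt =>
      obtain ⟨rfl, -, -⟩ : mh = a ∧ [] = b1 ∧ mt = m1 := by
        simpa [popB] using hp
      rcases List.mem_append.mp hx with h | h
      · simp at h
      · rcases List.mem_cons.mp h with rfl | h
        · exact le_refl _
        · exact (List.pairwise_cons.mp hm).1 x h
  | cons bh bt =>
    cases mixed with
    | nil =>
      obtain ⟨rfl, -, -⟩ : bh = a ∧ bt = b1 ∧ ([] : List Int) = m1 := by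
        simpa [popB] using hp
      rcases List.mem_append.mp hx with h | h
      · rcases List.mem_cons.mp h with rfl | h
        · exact le_refl _
        · exact (List.pairwise_cons.mp hb).1 x h
      · simp at h
    | cons mh mt =>
      by_cases hle : bh ≤ mh
      · obtain ⟨rfl, -, -⟩ : bh = a ∧ bt = b1 ∧ mh :: mt = m1 := by
          simpa [popB, hle] using hp
        rcases List.mem_append.mp hx with h | h
        · rcases List.mem_cons.mp h with rfl | h
          · exact le_refl _
          · exact (List.pairwise_cons.mp hb).1 x h
        · rcases List.mem_cons.mp h with rfl | h
          · exact hle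
          · exact le_trans hle ((List.pairwise_cons.mp hm).1 x h)
      · obtain ⟨ha, -, -⟩ : mh = a ∧ bh :: bt = b1 ∧ mt = m1 := by
          simpa [popB, hle] using hp
        rw [← ha]
        have hma : mh ≤ bh := le_of_lt (lt_of_not_ge hle)
        rcases List.mem_append.mp hx with h | h
        · rcases List.mem_cons.mp h with rfl | h
          · exact hma
          · exact le_trans hma ((List.pairwise_cons.mp hb).1 x h)
        · rcases List.mem_cons.mp h with rfl | h
          · exact le_refl _
          · exact (List.pairwise_cons.mp hm).1 x h

theorem popB_perm {base mixed : List Int} {a : Int} {b1 m1 : List Int}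
    (hp : popB base mixed = some (a, b1, m1)) :
    (base ++ mixed).Perm (a :: (b1 ++ m1)) := by
  rcases popB_cases hp with ⟨rfl, rfl⟩ | ⟨rfl, rfl⟩
  · exact List.Perm.refl _
  · exact List.perm_middle

-- popB returns none exactly when both queues are exhausted
theorem popB_none {base mixed : List Int}
    (hp : popB base mixed = none) : base = [] ∧ mixed = [] := by
  cases base with
  | nil =>
    cases mixed with
    | nil => exact ⟨rfl, rfl⟩
    | cons mh mt => simp [popB] at hp
  | cons bh bt =>
    cases mixed with
    | nil => simp [popB] at hp
    | cons mh mt =>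
      by_cases hle : bh ≤ mh <;> simp [popB, hle] at hp

-- sortedness survives popB on both queues
theorem popB_sorted {base mixed : List Int} {a : Int} {b1 m1 : List Int}
    (hb : base.Pairwise (· ≤ ·)) (hm : mixed.Pairwise (· ≤ ·))
    (hp : popB base mixed = some (a, b1, m1)) :
    b1.Pairwise (· ≤ ·) ∧ m1.Pairwise (· ≤ ·) := by
  rcases popB_cases hp with ⟨rfl, rfl⟩ | ⟨rfl, rfl⟩
  · exact ⟨(List.pairwise_cons.mp hb).2, hm⟩
  · exact ⟨hb, (List.pairwise_cons.mp hm).2⟩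

theorem popB_subset {base mixed : List Int} {a : Int} {b1 m1 : List Int}
    (hp : popB base mixed = some (a, b1, m1)) :
    (∀ x ∈ b1, x ∈ base) ∧ (∀ x ∈ m1, x ∈ mixed) := by
  rcases popB_cases hp with ⟨rfl, rfl⟩ | ⟨rfl, rfl⟩
  · exact ⟨fun x hx => List.mem_cons_of_mem a hx, fun x hx => hx⟩
  · exact ⟨fun x hx => hx, fun x hx => List.mem_cons_of_mem a hx⟩

-- every surviving combined value is ≤ 3a where a is the value just popped
theorem mixed_le_three_a {base mixed b1 m1 : List Int} {a : Int}
    (hInv : InvB base mixed) (hp : popB base mixed = some (a, b1, m1)) :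
    ∀ m ∈ m1, m ≤ 3 * a := by
  obtain ⟨hb, hm, h3, h4⟩ := hInv
  intro m hmem
  rcases popB_cases hp with ⟨rfl, rfl⟩ | ⟨rfl, rfl⟩
  · exact h3 m hmem a List.mem_cons_self
  · exact ((List.pairwise_cons.mp h4).1 m hmem).2

-- the invariant is preserved by one full round of the loop
theorem invB_step {base mixed base1 mixed1 base2 mixed2 : List Int} {a b : Int}
    (hInv : InvB base mixed)
    (hp1 : popB base mixed = some (a, base1, mixed1))
    (hp2 : popB base1 mixed1 = some (b, base2, mixed2)) :
    InvB base2 (mixed2 ++ [a + b * 2]) := by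
  obtain ⟨hb, hm, h3, h4⟩ := hInv
  obtain ⟨hb1, hm1⟩ := popB_sorted hb hm hp1
  obtain ⟨hb2, hm2⟩ := popB_sorted hb1 hm1 hp2
  obtain ⟨hsubB1, hsubM1⟩ := popB_subset hp1
  obtain ⟨hsubB2, hsubM2⟩ := popB_subset hp2
  have amin : ∀ x ∈ base ++ mixed, a ≤ x := popB_min hb hm hp1
  have bmin : ∀ x ∈ base1 ++ mixed1, b ≤ x := popB_min hb1 hm1 hp2
  have hbmem : b ∈ base1 ++ mixed1 := by
    rcases popB_cases hp2 with ⟨h, -⟩ | ⟨-, h⟩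
    · exact List.mem_append.mpr (Or.inl (h ▸ List.mem_cons_self))
    · exact List.mem_append.mpr (Or.inr (h ▸ List.mem_cons_self))
  have hab : a ≤ b := by
    apply amin
    rcases List.mem_append.mp hbmem with h | h
    · exact List.mem_append.mpr (Or.inl (hsubB1 b h))
    · exact List.mem_append.mpr (Or.inr (hsubM1 b h))
  have m3a : ∀ m ∈ mixed2, m ≤ 3 * a := fun m hmem =>
    mixed_le_three_a ⟨hb, hm, h3, h4⟩ hp1 m (hsubM2 m hmem)
  have mgeb : ∀ m ∈ mixed2, b ≤ m := fun m hmem =>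
    bmin m (List.mem_append.mpr (Or.inr (hsubM2 m hmem)))
  refine ⟨hb2, ?_, ?_, ?_⟩
  · -- mixed2 ++ [c] sorted
    rw [List.pairwise_append]
    refine ⟨hm2, List.pairwise_singleton _ _, ?_⟩
    intro m hmem c hc
    rcases List.mem_singleton.mp hc with rfl
    have := m3a m hmem
    omega
  · -- every combined value ≤ 3x for x still in base2
    intro m hmem x hx
    have hxb1 : x ∈ base1 := hsubB2 x hx
    have hbx : b ≤ x := bmin x (List.mem_append.mpr (Or.inl hxb1))
    rcases List.mem_append.mp hmem with hmem | hc
    · exact h3 m (hsubM1 m (hsubM2 m hmem)) x (hsubB1 x hxb1)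
    · rcases List.mem_singleton.mp hc with rfl
      omega
  · -- pairwise factor-3 bound including the new value
    rw [List.pairwise_append]
    refine ⟨?_, List.pairwise_singleton _ _, ?_⟩
    · -- within mixed2: inherited from mixed
      have : mixed1.Pairwise (fun m m' => m ≤ 3 * m' ∧ m' ≤ 3 * m) := by
        rcases popB_cases hp1 with ⟨-, rfl⟩ | ⟨-, h⟩
        · exact h4
        · exact (List.pairwise_cons.mp (h ▸ h4)).2
      rcases popB_cases hp2 with ⟨-, rfl⟩ | ⟨-, h⟩
      · exact this
      · exact (List.pairwise_cons.mp (h ▸ this)).2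
    · intro m hmem c hc
      rcases List.mem_singleton.mp hc with rfl
      have h1 := m3a m hmem
      have h2 := mgeb m hmem
      constructor <;> omega

-- A pops the same value as B whenever B's state is a permutation of A's heap
theorem pyHeappop?_of_perm_min {h : List Int} {a : Int} {rest : List Int}
    (hperm : h.Perm (a :: rest)) (hmin : ∀ x ∈ a :: rest, a ≤ x) :
    pyHeappop? h = some (a, h.erase a) ∧ (h.erase a).Perm rest := by
  have hmem : a ∈ h := hperm.mem_iff.mpr List.mem_cons_self
  have hmin' : ∀ b ∈ h, a ≤ b := fun b hb => hmin b (hperm.mem_iff.mp hb)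
  have hm : h.min? = some a := by
    rw [List.min?_eq_some_iff]
    exact ⟨hmem, hmin'⟩
  constructor
  · unfold pyHeappop?; rw [hm]
  · have := hperm.erase a
    rwa [List.erase_cons_head] at this

-- non-dependent restatement of loopA's equation
theorem loopA_eq (K : Int) (h : List Int) (ans : Int) :
    loopA K h ans =
      match pyHeappop? h with
      | none => 0
      | some (a, h1) =>
        if a ≥ K then ans
        else if h1.length = 0 then -1
        else
          match pyHeappop? h1 with
          | none => 0
          | some (b, h2) => loopA K (pyHeappush h2 (a + b * 2)) (ans + 1) := by
  rw [loopA.eq_def]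
  split
  · rename_i hx; rw [hx]
  · rename_i a h1 hx
    rw [hx]
    by_cases hK : a ≥ K
    · simp [hK]
    · by_cases h0 : h1.length = 0
      · simp [hK, h0]
      · simp only [hK, h0, if_false]
        split
        · rename_i hy; rw [hy]
        · rename_i b h2 hy; rw [hy]

-- non-dependent restatement of loopB's equation
theorem loopB_eq (K : Int) (base mixed : List Int) (ans : Int) :
    loopB K base mixed ans =
      match popB base mixed with
      | none => 0
      | some (a, base1, mixed1) =>
        if a ≥ K then ans
        else if base1.length = 0 ∧ mixed1.length = 0 then -1
        else
          match popB base1 mixed1 with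
          | none => 0
          | some (b, base2, mixed2) => loopB K base2 (mixed2 ++ [a + b * 2]) (ans + 1) := by
  rw [loopB.eq_def]
  split
  · rename_i hx; rw [hx]
  · rename_i a base1 mixed1 hx
    rw [hx]
    by_cases hK : a ≥ K
    · simp [hK]
    · by_cases h0 : base1.length = 0 ∧ mixed1.length = 0
      · simp [hK, h0]
      · simp only [hK, h0, if_false]
        split
        · rename_i hy; rw [hy]
        · rename_i b base2 mixed2 hy; rw [hy]

-- main simulation: A's heap loop equals B's two-queue loop on permuted contents
theorem loop_eq (n : Nat) : ∀ (h base mixed : List Int) (K ans : Int),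
    base.length + mixed.length ≤ n → h.Perm (base ++ mixed) → InvB base mixed →
    loopA K h ans = loopB K base mixed ans := by
  induction n with
  | zero =>
    intro h base mixed K ans hlen hperm _
    have hb : base = [] := List.length_eq_zero_iff.mp (by omega)
    have hm : mixed = [] := List.length_eq_zero_iff.mp (by omega)
    subst hb; subst hm
    have hh : h = [] := List.Perm.eq_nil (by simpa using hperm)
    subst hh
    rw [loopA_eq, loopB_eq]
    rfl
  | succ n ih =>
    intro h base mixed K ans hlen hperm hInv
    have hbS := hInv.1
    have hmS := hInv.2.1
    cases hp : popB base mixed with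
    | none =>
      obtain ⟨hb, hm⟩ := popB_none hp
      subst hb; subst hm
      have hh : h = [] := List.Perm.eq_nil (by simpa using hperm)
      subst hh
      rw [loopA_eq, loopB_eq]
      rfl
    | some v =>
      obtain ⟨a, base1, mixed1⟩ := v
      have hperm1 : h.Perm (a :: (base1 ++ mixed1)) := hperm.trans (popB_perm hp)
      obtain ⟨hpop, hpermE⟩ := pyHeappop?_of_perm_min hperm1
        (by
          intro x hx
          rcases List.mem_cons.mp hx with rfl | hx
          · exact le_refl _
          · exact popB_min hbS hmS hp x ((popB_perm hp).mem_iff.mpr (List.mem_cons_of_mem a hx)))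
      rw [loopA_eq, loopB_eq]
      simp only [hp, hpop]
      by_cases hK : a ≥ K
      · simp [hK]
      · have hlenE : (h.erase a).length = base1.length + mixed1.length := by
          have := hpermE.length_eq; simpa using this
        by_cases h0 : base1.length = 0 ∧ mixed1.length = 0
        · have : (h.erase a).length = 0 := by omega
          simp [hK, h0, this]
        · have hne : ¬ (h.erase a).length = 0 := by omega
          obtain ⟨hb1S, hm1S⟩ := popB_sorted hbS hmS hp
          cases hp2 : popB base1 mixed1 with
          | none =>
            exfalso
            obtain ⟨hb1, hm1⟩ := popB_none hp2
            exact h0 (by simp [hb1, hm1])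
          | some v2 =>
            obtain ⟨b, base2, mixed2⟩ := v2
            have hperm2 : (h.erase a).Perm (b :: (base2 ++ mixed2)) :=
              hpermE.trans (popB_perm hp2)
            obtain ⟨hpop2, hpermE2⟩ := pyHeappop?_of_perm_min hperm2
              (by
                intro x hx
                rcases List.mem_cons.mp hx with rfl | hx
                · exact le_refl _
                · exact popB_min hb1S hm1S hp2 x
                    ((popB_perm hp2).mem_iff.mpr (List.mem_cons_of_mem b hx)))
            simp only [hK, hne, h0, if_false, hpop2]
            apply ih
            · have l1 := popB_length hp
              have l2 := popB_length hp2
              simp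
              omega
            · have hch : ((h.erase a).erase b ++ [a + b * 2]).Perm
                  ((base2 ++ mixed2) ++ [a + b * 2]) := hpermE2.append_right _
              simpa [pyHeappush, List.append_assoc] using hch
            · exact invB_step hInv hp hp2

theorem heapSortA_eq (l : List Int) : heapSortA l = l := by
  have : ∀ (l acc : List Int), acc ++ l = l.foldl pyHeappush acc := by
    intro l
    induction l with
    | nil => simp
    | cons x t ih => intro acc; rw [List.foldl_cons]; simpa [pyHeappush] using ih (acc ++ [x])
  simpa using (this l []).symm

-- ===== VERDICT (by name: the statement is the Claim_ definition above) =====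
theorem solution_spec : Claim_equal_solution := by
  intro scoville K _ _
  unfold Spec_solution solution solution_alt
  rw [heapSortA_eq]
  refine loop_eq scoville.length _ _ _ _ _ ?_ ?_ ?_
  · have hl := (PySem.List.sorted_perm scoville (fun x => x) false).length_eq
    simp only [List.length_nil]
    omega
  · simpa using (PySem.List.sorted_perm scoville (fun x => x) false).symm
  · refine ⟨?_, List.Pairwise.nil, by simp, List.Pairwise.nil⟩
    have := PySem.List.sorted_pairwise scoville (fun x => x)
    simpa using this
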